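-- pv_equiv track=rewrite | github.com/Tomasteawita/white_finance | scripts/golden/lambdas/builders/stocks.py | _get_securitie_type
-- ===== SOURCE A (Python) =====
-- def _get_securitie_type(name):
--     name = name.lower().split(' ')
--     keywords = {
--         'cedear': 'cedear',
--         'on': 'obligacion negociable',
--         'obligacion': 'obligacion negociable',
--         'bon': 'bono',
--         'bono': 'bono',
--         'bonos': 'bono',
--         'vto': 'bono',
--         'letra': 'letra del tesoro',
--         'fondo': 'fondo comun de inversion',
--         'fci': 'fondo comun de inversion',
--         'comun': 'fondo comun de inversion'
--     }
--
--     for key, value in keywords.items():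
--         if key in name:
--             return value
--     return 'accion'
-- ===== SOURCE B (Python) =====
-- _KEYS = ['cedear', 'on', 'obligacion', 'bon', 'bono', 'bonos', 'vto',
--          'letra', 'fondo', 'fci', 'comun']
-- _VALUES = ['cedear', 'obligacion negociable', 'obligacion negociable', 'bono',
--            'bono', 'bono', 'bono', 'letra del tesoro',
--            'fondo comun de inversion', 'fondo comun de inversion',
--            'fondo comun de inversion']
-- _PRIORITY = {k: i for i, k in enumerate(_KEYS)}
--
--
-- def _get_securitie_type(name):
--     best = None
--     for word in name.lower().split(' '):
--         i = _PRIORITY.get(word)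
--         if i is not None and (best is None or i < best):
--             best = i
--     return 'accion' if best is None else _VALUES[best]
-- ===== Notes on version B (the rewrite author's own statement) =====
-- stated objective: alternative
-- what changed: B precomputes a keyword->priority-index dict once and makes a single pass over the words of the name keeping the minimum priority seen, instead of A's loop over the keyword dict testing list membership of each key; the first-present-key tie-break is reproduced because the first dict key present is exactly the minimum-index keyword occurring among the words.
import Mathlib
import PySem

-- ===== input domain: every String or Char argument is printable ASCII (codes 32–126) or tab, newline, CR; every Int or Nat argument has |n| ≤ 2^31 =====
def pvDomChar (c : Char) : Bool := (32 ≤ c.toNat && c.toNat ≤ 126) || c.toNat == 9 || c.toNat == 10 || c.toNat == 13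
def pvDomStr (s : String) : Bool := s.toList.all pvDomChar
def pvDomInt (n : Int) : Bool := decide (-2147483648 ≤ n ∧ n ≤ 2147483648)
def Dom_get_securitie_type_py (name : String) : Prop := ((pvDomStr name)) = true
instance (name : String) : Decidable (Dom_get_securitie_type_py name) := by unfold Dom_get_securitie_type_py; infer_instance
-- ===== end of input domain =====

-- B inverts A's loop: it scans the words once keeping the minimum keyword-priority index
-- instead of scanning the keyword dict testing list membership (objective: alternative).

-- ===== PORT A =====
def pvPairsA : List (String × String) :=
  [("cedear", "cedear"), ("on", "obligacion negociable"),
   ("obligacion", "obligacion negociable"), ("bon", "bono"), ("bono", "bono"),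
   ("bonos", "bono"), ("vto", "bono"), ("letra", "letra del tesoro"),
   ("fondo", "fondo comun de inversion"), ("fci", "fondo comun de inversion"),
   ("comun", "fondo comun de inversion")]

-- `for key, value in keywords.items(): if key in name: return value` / `return 'accion'`
def pvLoopA : List (String × String) → List String → String
  | [], _ => "accion"
  | (k, v) :: rest, ws => if ws.contains k then v else pvLoopA rest ws

def get_securitie_type_py (name : String) : String :=
  -- sep " " ≠ "" so split? is always `some`: the getD default is unreachable (exact)
  pvLoopA pvPairsA ((PySem.Str.split? (PySem.Str.lower name) " ").getD [])

-- ===== PORT B =====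
def pvKeysB : List String :=
  ["cedear", "on", "obligacion", "bon", "bono", "bonos", "vto", "letra",
   "fondo", "fci", "comun"]

def pvValuesB : List String :=
  ["cedear", "obligacion negociable", "obligacion negociable", "bono", "bono",
   "bono", "bono", "letra del tesoro", "fondo comun de inversion",
   "fondo comun de inversion", "fondo comun de inversion"]

-- _PRIORITY = {k: i for i, k in enumerate(_KEYS)}
def pvPrioB : PySem.Dict String Int :=
  PySem.Dict.ofList ((PySem.List.enumerate pvKeysB).map (fun p => (p.2, p.1)))

-- body of B's for-loop: `i = _PRIORITY.get(word); if i is not None and (best is None or i < best): best = i`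
def pvStepB (best : Option Int) (word : String) : Option Int :=
  match pvPrioB.get? word with
  | none => best
  | some i =>
    match best with
    | none => some i
    | some b => if i < b then some i else some b

def get_securitie_type_py_alt (name : String) : String :=
  match ((PySem.Str.split? (PySem.Str.lower name) " ").getD []).foldl pvStepB none with
  | none => "accion"
  | some i => (PySem.List.pyGet? pvValuesB i).getD ""   -- i is always in range; default unreachable

-- ===== PRECONDITION & SPEC =====
def Spec_get_securitie_type_py (name : String) (out : String) : Prop := out = get_securitie_type_py_alt name
instance (name : String) (out : String) : Decidable (Spec_get_securitie_type_py name out) := by unfold Spec_get_securitie_type_py; infer_instance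

-- ===== CLAIM (what is proved, stated in full; the proofs are below) =====
def Claim_equal_get_securitie_type_py : Prop := ∀ (name : String), Dom_get_securitie_type_py name → Spec_get_securitie_type_py name (get_securitie_type_py name)

-- ===== LEMMAS AND PROOFS =====

-- min on Option Int (none = no keyword seen yet): the state B's loop maintains
def pvMerge : Option Int → Option Int → Option Int
  | none, b => b
  | some a, none => some a
  | some a, some b => some (min a b)

-- index (starting at n) of the first key of ks that occurs in ws — A's search, made recursive in ks
def pvChain : List String → Int → List String → Option Int
  | [], _, _ => none
  | k :: ks, n, ws => if ws.contains k then some n else pvChain ks (n + 1) ws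

-- index (starting at n) of w in ks — what _PRIORITY.get(word) computes
def pvLook : List String → Int → String → Option Int
  | [], _, _ => none
  | k :: ks, n, w => if k == w then some n else pvLook ks (n + 1) w

def pvRender : Option Int → String
  | none => "accion"
  | some i => (PySem.List.pyGet? pvValuesB i).getD ""

lemma pvChain_ge (ks : List String) (n : Int) (ws : List String) (j : Int)
    (h : pvChain ks n ws = some j) : n ≤ j := by
  induction ks generalizing n with
  | nil => simp [pvChain] at h
  | cons k ks ih =>
    simp only [pvChain] at h
    split at h
    · cases h; omega
    · have := ih (n + 1) h; omega

lemma pvLook_ge (ks : List String) (n : Int) (w : String) (j : Int)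
    (h : pvLook ks n w = some j) : n ≤ j := by
  induction ks generalizing n with
  | nil => simp [pvLook] at h
  | cons k ks ih =>
    simp only [pvLook] at h
    split at h
    · cases h; omega
    · have := ih (n + 1) h; omega

-- the crux: prepending a word to ws merges that word's priority into A's first-hit index
lemma pvMerge_chain (ks : List String) (w : String) (ws : List String) (n : Int) :
    pvMerge (pvLook ks n w) (pvChain ks n ws) = pvChain ks n (w :: ws) := by
  induction ks generalizing n with
  | nil => rfl
  | cons k ks ih =>
    simp only [pvLook, pvChain, List.contains_cons]
    by_cases hkw : (k == w) = true
    · rw [if_pos hkw]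
      simp only [hkw, Bool.true_or, if_true]
      by_cases hc : ws.contains k = true
      · rw [if_pos hc]; simp [pvMerge]
      · rw [if_neg hc]
        cases h : pvChain ks (n + 1) ws with
        | none => rfl
        | some j =>
          have := pvChain_ge ks (n + 1) ws j h
          simp only [pvMerge]
          congr 1
          omega
    · rw [if_neg hkw]
      simp only [hkw, Bool.false_or]
      by_cases hc : ws.contains k = true
      · rw [if_pos hc, if_pos hc]
        cases h : pvLook ks (n + 1) w with
        | none => rfl
        | some j =>
          have := pvLook_ge ks (n + 1) w j h
          simp only [pvMerge]
          congr 1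
          omega
      · rw [if_neg hc, if_neg hc]
        exact ih (n + 1)

lemma pvGetNil (w : String) : (PySem.Dict.mk ([] : List (String × Int))).get? w = none := rfl

lemma pvPrio_get (w : String) : pvPrioB.get? w = pvLook pvKeysB 0 w := by
  have h : pvPrioB = PySem.Dict.mk
      [("cedear", 0), ("on", 1), ("obligacion", 2), ("bon", 3), ("bono", 4),
       ("bonos", 5), ("vto", 6), ("letra", 7), ("fondo", 8), ("fci", 9),
       ("comun", 10)] := by decide
  rw [h]
  simp only [PySem.Dict.get?_mk_cons, pvKeysB, pvLook, pvGetNil]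
  norm_num

lemma pvStepB_eq (b : Option Int) (w : String) :
    pvStepB b w = pvMerge b (pvPrioB.get? w) := by
  cases h : pvPrioB.get? w with
  | none => cases b <;> simp [pvStepB, pvMerge, h]
  | some i =>
    cases b with
    | none => simp [pvStepB, pvMerge, h]
    | some a =>
      simp only [pvStepB, pvMerge, h]
      split_ifs <;> simp <;> omega

lemma pvMerge_assoc (a b c : Option Int) :
    pvMerge (pvMerge a b) c = pvMerge a (pvMerge b c) := by
  cases a <;> cases b <;> cases c <;> simp [pvMerge, min_assoc]

lemma pvFoldB_eq (ws : List String) (acc : Option Int) :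
    ws.foldl pvStepB acc = pvMerge acc (pvChain pvKeysB 0 ws) := by
  induction ws generalizing acc with
  | nil =>
    cases acc <;> simp [pvMerge, pvChain, pvKeysB]
  | cons w ws ih =>
    rw [List.foldl_cons, ih, pvStepB_eq, pvMerge_assoc, pvPrio_get, pvMerge_chain]

lemma pvLoopA_eq (ws : List String) :
    pvLoopA pvPairsA ws = pvRender (pvChain pvKeysB 0 ws) := by
  simp only [pvPairsA, pvKeysB]
  by_cases h1 : "cedear" ∈ ws
  · simp [pvLoopA, pvChain, h1]; rfl
  by_cases h2 : "on" ∈ ws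
  · simp [pvLoopA, pvChain, h1, h2]; rfl
  by_cases h3 : "obligacion" ∈ ws
  · simp [pvLoopA, pvChain, h1, h2, h3]; rfl
  by_cases h4 : "bon" ∈ ws
  · simp [pvLoopA, pvChain, h1, h2, h3, h4]; rfl
  by_cases h5 : "bono" ∈ ws
  · simp [pvLoopA, pvChain, h1, h2, h3, h4, h5]; rfl
  by_cases h6 : "bonos" ∈ ws
  · simp [pvLoopA, pvChain, h1, h2, h3, h4, h5, h6]; rfl
  by_cases h7 : "vto" ∈ ws
  · simp [pvLoopA, pvChain, h1, h2, h3, h4, h5, h6, h7]; rfl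
  by_cases h8 : "letra" ∈ ws
  · simp [pvLoopA, pvChain, h1, h2, h3, h4, h5, h6, h7, h8]; rfl
  by_cases h9 : "fondo" ∈ ws
  · simp [pvLoopA, pvChain, h1, h2, h3, h4, h5, h6, h7, h8, h9]; rfl
  by_cases h10 : "fci" ∈ ws
  · simp [pvLoopA, pvChain, h1, h2, h3, h4, h5, h6, h7, h8, h9, h10]; rfl
  by_cases h11 : "comun" ∈ ws
  · simp [pvLoopA, pvChain, h1, h2, h3, h4, h5, h6, h7, h8, h9, h10, h11]; rfl
  simp [pvLoopA, pvChain, h1, h2, h3, h4, h5, h6, h7, h8, h9, h10, h11]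
  rfl

-- ===== VERDICT (by name: the statement is the Claim_ definition above) =====
theorem get_securitie_type_py_spec : Claim_equal_get_securitie_type_py := by
  intro name _
  unfold Spec_get_securitie_type_py get_securitie_type_py get_securitie_type_py_alt
  rw [pvLoopA_eq, pvFoldB_eq]
  rfl
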